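-- pv_equiv track=rewrite | github.com/micheloosterhof/stethoscope | lib.py | isomorph
-- ===== SOURCE A (Python) =====
-- from typing import Dict, List
--
-- def isomorph(ciphertext: List[int]) -> str:
--     """
--     Input is a piece of ciphertext as a list of int
--     Output is this normalized as an isomorph, it's output as a string for easy comparison in alphabet A-Z
--     Example ATTACK and EFFECT both normalize to ABBACD
--     """
--     output = ""
--     letter = "A"
--     mapping: Dict[int, str] = {}
--     for r in ciphertext:
--         if r not in mapping:
--             mapping[r] = letter
--             letter = chr(ord(letter) + 1)
--         output = output + mapping[r]
--     return output
-- ===== SOURCE B (Python) =====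
-- def isomorph(ciphertext):
--     """Sort-based ranking: a reverse sweep records each value's first-occurrence
--     position, the distinct values are sorted by that position, and every symbol
--     is translated through its rank in the sorted order."""
--     first = {}
--     for i, v in reversed(list(enumerate(ciphertext))):
--         first[v] = i
--     order = sorted(first, key=first.get)
--     rank = {v: r for r, v in enumerate(order)}
--     return ''.join(chr(65 + rank[v]) for v in ciphertext)
-- ===== Notes on version B (the rewrite author's own statement) =====
-- stated objective: alternative
-- what changed: Replaces A's single interleaved dict-and-next-letter loop with a sort-based ranking pipeline: a reverse sweep records first-occurrence positions, the distinct values are sorted by those positions, and symbols are translated through their rank in the sorted order.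
import Mathlib
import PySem

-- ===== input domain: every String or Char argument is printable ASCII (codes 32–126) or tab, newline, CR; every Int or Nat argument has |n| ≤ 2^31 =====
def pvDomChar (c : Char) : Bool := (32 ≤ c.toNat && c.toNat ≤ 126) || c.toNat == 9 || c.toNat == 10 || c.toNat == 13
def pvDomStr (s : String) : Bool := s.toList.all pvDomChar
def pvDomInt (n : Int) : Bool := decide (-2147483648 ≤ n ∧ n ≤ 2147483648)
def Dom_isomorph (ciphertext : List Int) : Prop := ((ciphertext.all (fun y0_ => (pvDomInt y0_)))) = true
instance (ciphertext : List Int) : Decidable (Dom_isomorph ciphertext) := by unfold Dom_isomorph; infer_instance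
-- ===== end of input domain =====

-- B replaces A's interleaved dict-and-next-letter loop with a sort-based ranking pipeline
-- (reverse sweep for first-occurrence positions, sort the distinct values by them, enumerate ranks).
-- Python strings are built as List Char and converted once at return; one-char strings (letter, dict
-- values) are modelled by their character / its code, so chr/ord are Char.ofNat / the code itself.

-- ===== PORT A =====
-- the body of A's for-loop: state = (output, letter code, mapping)
def isoStepA (st : List Char × Nat × PySem.Dict Int Char) (r : Int) : List Char × Nat × PySem.Dict Int Char :=
  if st.2.2.contains r then
    (st.1 ++ [st.2.2.getD r 'A'], st.2.1, st.2.2)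
  else
    let m := st.2.2.insert r (Char.ofNat st.2.1)   -- mapping[r] = letter
    (st.1 ++ [m.getD r 'A'], st.2.1 + 1, m)        -- letter = chr(ord(letter)+1); output = output + mapping[r]

def isomorph (ciphertext : List Int) : String :=
  let st := ciphertext.foldl isoStepA ([], 65, PySem.Dict.empty)
  String.ofList st.1

-- ===== PORT B =====
-- the body of both of B's dict-building loops over (index, value) pairs: d[p[1]] = p[0]
def insStep (d : PySem.Dict Int Int) (p : Int × Int) : PySem.Dict Int Int := d.insert p.2 p.1

-- sorted(first, key=first.get) iterates the dict's keys in insertion order; every key is present,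
-- so first.get never returns None and is modelled as getD. The sort key is injective on the keys,
-- and rank[v] is always present where it is looked up, so Python raises nowhere in B.
def isomorph_alt (ciphertext : List Int) : String :=
  let first := ((PySem.List.enumerate ciphertext 0).reverse).foldl insStep PySem.Dict.empty
  let order := PySem.List.sorted first.keys (fun v => first.getD v 0) false
  let rank := (PySem.List.enumerate order 0).foldl insStep PySem.Dict.empty
  String.ofList (ciphertext.map (fun v => Char.ofNat (65 + (rank.getD v 0).toNat)))

-- ===== PRECONDITION & SPEC =====
def Spec_isomorph (ciphertext : List Int) (out : String) : Prop := out = isomorph_alt ciphertext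
instance (ciphertext : List Int) (out : String) : Decidable (Spec_isomorph ciphertext out) := by unfold Spec_isomorph; infer_instance

-- ===== CLAIM (what is proved, stated in full; the proofs are below) =====
def Claim_equal_isomorph : Prop := ∀ (ciphertext : List Int), Dom_isomorph ciphertext → Spec_isomorph ciphertext (isomorph ciphertext)

-- ===== LEMMAS AND PROOFS =====

-- index? through an append with a fresh head: the new element's first index is the prefix length
theorem index?_append_cons_self (pre t : List Int) (x : Int) (hx : x ∉ pre) :
    PySem.List.index? (pre ++ x :: t) x = some pre.length := by
  rw [PySem.List.index?_eq_some_iff]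
  exact ⟨pre, t, rfl, rfl, hx⟩

-- index? ignores a trailing element different from the query
theorem index?_append_singleton_of_ne (s : List Int) (c v : Int) (h : v ≠ c) :
    PySem.List.index? (s ++ [c]) v = PySem.List.index? s v := by
  induction s with
  | nil =>
    simp only [List.nil_append, PySem.List.index?_eq_idxOf?, List.idxOf?, List.findIdx?,
      List.findIdx?.go, beq_iff_eq]
    simp [Ne.symm h]
  | cons a s ih =>
    rw [List.cons_append]
    by_cases hav : a = v
    · subst hav; rw [PySem.List.index?_cons_self, PySem.List.index?_cons_self]
    · rw [PySem.List.index?_cons_of_ne _ hav, PySem.List.index?_cons_of_ne _ hav, ih]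

-- Set.update only appends
theorem update_append (l : List Int) : ∀ (s : PySem.Set Int), ∃ t, PySem.Set.update s l = s ++ t := by
  induction l with
  | nil => intro s; exact ⟨[], by simp [PySem.Set.update]⟩
  | cons x l ih =>
    intro s
    have hu : PySem.Set.update s (x :: l) = PySem.Set.update (PySem.Set.add s x) l := by
      simp [PySem.Set.update]
    obtain ⟨t, ht⟩ := ih (PySem.Set.add s x)
    by_cases hx : PySem.Set.contains s x
    · refine ⟨t, ?_⟩
      rw [hu, ht, PySem.Set.add, if_pos hx]
    · refine ⟨x :: t, ?_⟩
      rw [hu, ht, PySem.Set.add, if_neg hx]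
      simp

theorem ofList_append_singleton (pre : List Int) (x : Int) :
    PySem.Set.ofList (pre ++ [x]) = PySem.Set.add (PySem.Set.ofList pre) x := by
  rw [PySem.Set.ofList_eq_foldl, PySem.Set.ofList_eq_foldl, List.foldl_append]
  rfl

-- the distinct values in first-occurrence order have strictly increasing first indices
theorem ofList_pairwise_idx_aux (full : List Int) : ∀ (l pre : List Int), pre ++ l = full →
    (PySem.Set.ofList pre).Pairwise
      (fun a b => (PySem.List.index? full a).getD 0 < (PySem.List.index? full b).getD 0) →
    (PySem.Set.ofList (pre ++ l)).Pairwise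
      (fun a b => (PySem.List.index? full a).getD 0 < (PySem.List.index? full b).getD 0) := by
  intro l
  induction l with
  | nil => intro pre _ hp; simpa using hp
  | cons x t ih =>
    intro pre hfull hp
    have h1 : pre ++ x :: t = (pre ++ [x]) ++ t := by simp
    rw [h1]
    apply ih (pre ++ [x]) (by simpa using hfull)
    rw [ofList_append_singleton]
    by_cases hx : x ∈ PySem.Set.ofList pre
    · rwa [PySem.Set.add, if_pos (by simp [PySem.Set.contains, hx])]
    · rw [PySem.Set.add, if_neg (by simp [PySem.Set.contains, hx])]
      rw [List.pairwise_append]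
      refine ⟨hp, List.pairwise_singleton _ _, ?_⟩
      intro a ha y hy
      rw [List.mem_singleton] at hy; rw [hy]
      have hapre : a ∈ pre := (PySem.Set.mem_ofList pre a).1 ha
      have hxpre : x ∉ pre := fun hc => hx ((PySem.Set.mem_ofList pre x).2 hc)
      have hxidx : PySem.List.index? full x = some pre.length := by
        rw [← hfull]; exact index?_append_cons_self pre t x hxpre
      have haidx : PySem.List.index? full a = PySem.List.index? pre a := by
        rw [← hfull]; exact PySem.List.index?_append_of_mem _ hapre
      obtain ⟨k, hk⟩ := Option.isSome_iff_exists.1 ((PySem.List.index?_isSome_iff pre a).2 hapre)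
      obtain ⟨hlt, -⟩ := PySem.List.getElem_of_index?_eq_some hk
      rw [hxidx, haidx, hk]
      simpa using hlt

theorem ofList_pairwise_idx (xs : List Int) :
    (PySem.Set.ofList xs).Pairwise
      (fun a b => (PySem.List.index? xs a).getD 0 < (PySem.List.index? xs b).getD 0) := by
  have h := ofList_pairwise_idx_aux xs xs [] rfl (by simp [PySem.Set.ofList_eq_foldl])
  simpa using h

theorem dict_getD_eq_get? {κ ν : Type} [BEq κ] (d : PySem.Dict κ ν) (k : κ) (v : ν) :
    d.getD k v = (d.get? k).getD v := by
  simp [PySem.Dict.getD, PySem.Dict.get?]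

-- B's reverse fold: the FIRST occurrence's index wins (it is the last write)
theorem firstFold_get? (xs : List Int) : ∀ (s : Int) (d : PySem.Dict Int Int) (v : Int),
    (((PySem.List.enumerate xs s).reverse).foldl insStep d).get? v
      = ((PySem.List.index? xs v).map (fun j => s + (j : Int))).or (d.get? v) := by
  induction xs with
  | nil => intro s d v; simp [PySem.List.enumerate, PySem.List.index?_eq_idxOf?]
  | cons x xs ih =>
    intro s d v
    have he : PySem.List.enumerate (x :: xs) s = (s, x) :: PySem.List.enumerate xs (s + 1) := by
      simp [PySem.List.enumerate]
    rw [he, List.reverse_cons, List.foldl_append]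
    simp only [List.foldl_cons, List.foldl_nil]
    by_cases hv : v = x
    · subst hv
      rw [insStep, PySem.Dict.get?_insert_self, PySem.List.index?_cons_self]
      simp
    · rw [insStep, PySem.Dict.get?_insert_of_ne _ _ hv, ih (s + 1) d v,
        PySem.List.index?_cons_of_ne _ (fun h => hv h.symm)]
      rcases PySem.List.index? xs v with _ | j
      · rfl
      · simp [Option.or]; omega

-- B's forward fold over a list with no duplicates: the same characterisation
theorem rankFold_get? (xs : List Int) (hnd : xs.Nodup) : ∀ (s : Int) (d : PySem.Dict Int Int) (v : Int),
    ((PySem.List.enumerate xs s).foldl insStep d).get? v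
      = ((PySem.List.index? xs v).map (fun j => s + (j : Int))).or (d.get? v) := by
  induction xs with
  | nil => intro s d v; simp [PySem.List.enumerate, PySem.List.index?_eq_idxOf?]
  | cons x xs ih =>
    intro s d v
    rw [List.nodup_cons] at hnd
    have he : PySem.List.enumerate (x :: xs) s = (s, x) :: PySem.List.enumerate xs (s + 1) := by
      simp [PySem.List.enumerate]
    rw [he, List.foldl_cons]
    rw [ih hnd.2 (s + 1) (insStep d (s, x)) v]
    by_cases hv : v = x
    · subst hv
      have hidx : PySem.List.index? xs v = none := (PySem.List.index?_eq_none_iff xs v).2 hnd.1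
      rw [hidx, PySem.List.index?_cons_self, insStep, PySem.Dict.get?_insert_self]
      simp
    · rw [insStep, PySem.Dict.get?_insert_of_ne _ _ hv,
        PySem.List.index?_cons_of_ne _ (fun h => hv h.symm)]
      rcases PySem.List.index? xs v with _ | j
      · rfl
      · simp [Option.or]; omega

theorem keys_firstFold (xs : List Int) (d : PySem.Dict Int Int) :
    (((PySem.List.enumerate xs 0).reverse).foldl insStep d).keys
      = PySem.Set.update d.keys xs.reverse := by
  have h := PySem.Dict.keys_foldl_insert_key (ν := Int) ((PySem.List.enumerate xs 0).reverse)
      (fun p : Int × Int => p.2) (fun _ p => p.1) d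
  have hfold : ((PySem.List.enumerate xs 0).reverse).foldl insStep d
      = ((PySem.List.enumerate xs 0).reverse).foldl
          (fun d' (x : Int × Int) => d'.insert x.2 x.1) d := rfl
  rw [hfold, h]
  rw [List.map_reverse, PySem.List.map_snd_enumerate]

theorem perm_ofList_reverse (xs : List Int) :
    (PySem.Set.ofList xs).Perm (PySem.Set.ofList xs.reverse) := by
  rw [List.perm_ext_iff_of_nodup (PySem.Set.nodup_ofList xs) (PySem.Set.nodup_ofList xs.reverse)]
  intro a
  rw [PySem.Set.mem_ofList, PySem.Set.mem_ofList, List.mem_reverse]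

theorem first_get?_mem (xs : List Int) {v : Int} (hv : v ∈ xs) :
    (((PySem.List.enumerate xs 0).reverse).foldl insStep PySem.Dict.empty).get? v
      = some ((PySem.List.index? xs v).getD 0 : Nat) := by
  obtain ⟨j, hj⟩ := Option.isSome_iff_exists.1 ((PySem.List.index?_isSome_iff xs v).2 hv)
  rw [firstFold_get? xs 0 PySem.Dict.empty v, hj]
  simp

-- sorting the first-occurrence dict's keys by their recorded positions gives set(xs) in first-occurrence order
theorem order_eq (xs : List Int) :
    PySem.List.sorted (((PySem.List.enumerate xs 0).reverse).foldl insStep PySem.Dict.empty).keys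
      (fun v => (((PySem.List.enumerate xs 0).reverse).foldl insStep PySem.Dict.empty).getD v 0) false
      = PySem.Set.ofList xs := by
  apply PySem.List.sorted_eq_of_perm_of_pairwise_lt
  · rw [keys_firstFold]
    have hkeys : PySem.Set.update (PySem.Dict.empty (κ := Int) (ν := Int)).keys xs.reverse
        = PySem.Set.ofList xs.reverse := by
      rw [PySem.Set.ofList_eq_foldl]; rfl
    rw [hkeys]
    exact perm_ofList_reverse xs
  · refine (ofList_pairwise_idx xs).imp_of_mem ?_
    intro a b ha hb hlt
    have ha' : a ∈ xs := (PySem.Set.mem_ofList xs a).1 ha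
    have hb' : b ∈ xs := (PySem.Set.mem_ofList xs b).1 hb
    rw [dict_getD_eq_get?, dict_getD_eq_get?, first_get?_mem xs ha', first_get?_mem xs hb']
    simpa using hlt

-- B computes the map through the first-occurrence index in set(xs)
theorem alt_eq (xs : List Int) :
    isomorph_alt xs = String.ofList (xs.map (fun v =>
      Char.ofNat (65 + (PySem.List.index? (PySem.Set.ofList xs) v).getD 0))) := by
  show String.ofList (xs.map (fun v => Char.ofNat (65 +
      (((PySem.List.enumerate (PySem.List.sorted
          (((PySem.List.enumerate xs 0).reverse).foldl insStep PySem.Dict.empty).keys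
          (fun v => (((PySem.List.enumerate xs 0).reverse).foldl insStep PySem.Dict.empty).getD v 0)
          false) 0).foldl insStep PySem.Dict.empty).getD v 0).toNat))) = _
  rw [order_eq]
  congr 1
  apply List.map_congr_left
  intro v hv
  have hvord : v ∈ PySem.Set.ofList xs := (PySem.Set.mem_ofList xs v).2 hv
  obtain ⟨j, hj⟩ := Option.isSome_iff_exists.1
    ((PySem.List.index?_isSome_iff (PySem.Set.ofList xs) v).2 hvord)
  rw [dict_getD_eq_get?,
    rankFold_get? (PySem.Set.ofList xs) (PySem.Set.nodup_ofList xs) 0 PySem.Dict.empty v, hj]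
  simp

-- main invariant: A's fold from a state related to the seen-set emits the same characters
theorem iso_invariant (l : List Int) : ∀ (out : List Char) (m : PySem.Dict Int Char) (seen : PySem.Set Int),
    (∀ v, m.get? v = (PySem.List.index? seen v).map (fun i => Char.ofNat (65 + i))) →
    (l.foldl isoStepA (out, 65 + seen.length, m)).1
      = out ++ l.map (fun v => Char.ofNat (65 + (PySem.List.index? (PySem.Set.update seen l) v).getD 0)) := by
  induction l with
  | nil => intro out m seen _; simp
  | cons r l ih =>
    intro out m seen hmd
    have hupd : PySem.Set.update seen (r :: l) = PySem.Set.update (PySem.Set.add seen r) l := by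
      simp [PySem.Set.update]
    have hcontains : m.contains r = PySem.Set.contains seen r := by
      by_cases hr : r ∈ seen
      · obtain ⟨i, hi⟩ := Option.isSome_iff_exists.1 ((PySem.List.index?_isSome_iff seen r).2 hr)
        have hm : m.get? r = some (Char.ofNat (65 + i)) := by rw [hmd r, hi]; rfl
        have h2 : m.contains r = true := by
          cases hc : m.contains r
          · rw [(PySem.Dict.get?_eq_none_iff_contains m r).2 hc] at hm; cases hm
          · rfl
        simp [h2, PySem.Set.contains]; exact hr
      · have hidx : PySem.List.index? seen r = none := (PySem.List.index?_eq_none_iff seen r).2 hr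
        have hm : m.get? r = none := by rw [hmd r, hidx]; rfl
        rw [(PySem.Dict.get?_eq_none_iff_contains m r).1 hm]
        simp [PySem.Set.contains]; exact hr
    by_cases hr : r ∈ seen
    · -- already seen: dict and set unchanged
      have hsc : PySem.Set.contains seen r = true := by simp [PySem.Set.contains]; exact hr
      have hadd : PySem.Set.add seen r = seen := by rw [PySem.Set.add, if_pos hsc]
      obtain ⟨i, hi⟩ := Option.isSome_iff_exists.1 ((PySem.List.index?_isSome_iff seen r).2 hr)
      have hstepA : isoStepA (out, 65 + seen.length, m) r
          = (out ++ [m.getD r 'A'], 65 + seen.length, m) := by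
        simp [isoStepA, hcontains, hr]
      have hmr : m.getD r 'A' = Char.ofNat (65 + i) := by
        rw [dict_getD_eq_get?, hmd r, hi]; rfl
      simp only [List.foldl_cons, hstepA, List.map_cons]
      rw [ih (out ++ [m.getD r 'A']) m seen hmd, hupd, hadd]
      obtain ⟨t, ht⟩ := update_append l seen
      have hrank : PySem.List.index? (PySem.Set.update seen l) r = some i := by
        rw [ht, PySem.List.index?_append_of_mem _ hr, hi]
      rw [hrank, hmr, List.append_assoc]
      rfl
    · -- new symbol: dict gains the next letter, set gains r at the end
      have hsc : PySem.Set.contains seen r = false := by simp [PySem.Set.contains]; exact hr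
      have hadd : PySem.Set.add seen r = seen ++ [r] := by rw [PySem.Set.add, if_neg (by rw [hsc]; simp)]
      have hstepA : isoStepA (out, 65 + seen.length, m) r
          = (out ++ [Char.ofNat (65 + seen.length)], 65 + seen.length + 1,
             m.insert r (Char.ofNat (65 + seen.length))) := by
        simp [isoStepA, hcontains, hr, dict_getD_eq_get?, PySem.Dict.get?_insert_self]
      have hmd' : ∀ v, (m.insert r (Char.ofNat (65 + seen.length))).get? v
          = (PySem.List.index? (seen ++ [r]) v).map (fun i => Char.ofNat (65 + i)) := by
        intro v
        rcases eq_or_ne v r with rfl | hne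
        · rw [PySem.Dict.get?_insert_self, PySem.List.index?_append_singleton_self seen _ hr]; rfl
        · rw [PySem.Dict.get?_insert_of_ne _ _ hne, index?_append_singleton_of_ne seen r v hne, hmd v]
      simp only [List.foldl_cons, hstepA, List.map_cons]
      have hlen : 65 + seen.length + 1 = 65 + (seen ++ [r]).length := by simp; omega
      rw [hlen, ih (out ++ [Char.ofNat (65 + seen.length)]) _ (seen ++ [r]) hmd', hupd, hadd]
      obtain ⟨t, ht⟩ := update_append l (seen ++ [r])
      have hrmem : r ∈ seen ++ [r] := by simp
      have hrank : PySem.List.index? (PySem.Set.update (seen ++ [r]) l) r = some seen.length := by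
        rw [ht, PySem.List.index?_append_of_mem _ hrmem,
          PySem.List.index?_append_singleton_self seen _ hr]
      rw [hrank, List.append_assoc]
      rfl

-- ===== VERDICT (by name: the statement is the Claim_ definition above) =====
theorem isomorph_spec : Claim_equal_isomorph := by
  intro ciphertext _
  unfold Spec_isomorph isomorph
  rw [alt_eq]
  have h := iso_invariant ciphertext [] PySem.Dict.empty PySem.Set.empty
    (by intro v; simp [PySem.Dict.get?_empty, PySem.Set.empty, PySem.List.index?_eq_idxOf?])
  simp only [PySem.Set.empty, List.length_nil, List.nil_append] at h ⊢
  rw [h]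
  rw [show PySem.Set.update ([] : PySem.Set Int) ciphertext = PySem.Set.ofList ciphertext by
    rw [PySem.Set.ofList_eq_foldl]; rfl]
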